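-- pv_equiv track=rewrite | github.com/ETS-Next-Gen/AWE_Workbench | examples/example_lib.py | doctokens_to_text
-- ===== SOURCE A (Python) =====
-- NO_SPACE_BEFORE = [
--     ".", ",", ";", ":", "!", "?", " ", "-",
--     "'s", "'d", "'ve", "'ll", "'t", "'s", "n't",
--     "’s", "’d", "’ve", "’ll", "’t", "’s", "n’t",
--     None, "\n"
-- ]
--
-- NO_SPACE_AFTER = [' ', '', '\n', '-', None]
--
-- SUBSTITUTIONS = [
--     ['&nbsp;', ' '],
--     [' - ', '-'],
--     ['- ', '-'],
--     ['"', '" '],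
--     ['”', '"'],
--     ['“', '"'],
--     ['  ', ' '],
--     ['\n ', '\n']
-- ]
--
-- def ends_with_any(string, items):
--     """
--     Helper to check if the string ends with any of the items in the list
--     """
--     return any(string.endswith(item) for item in items
--                if item is not None and len(item) > 0)
--
-- def starts_with_any(string, items):
--     """
--     Helper to check if the string starts with any of the items in the list
--     """
--     if string is None:
--         return False
--     return any(string.startswith(item) for item in items
--                if item is not None and len(item) > 0)
--
-- def doctokens_to_text(doctokens):
--     '''
--     Convert doctokens to text. Returns text and a mapping of tokens
--     to posiitons. We actually need two mapping, for the starts and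
--     stops of tokens, due to spaces (which fall between tokens)
--     This is deeply imperfect with spaces around quotes. We don't have
--     a quick way to understand opening versus closing
--     quotes. Sometimes, we have “ and ”, but with ", we'd want some
--     ad-hoc algorithm.
--     '''
--     text = []
--     start_positions = []
--     stop_positions = []
--     for token, next_token in zip(doctokens, doctokens[1:]+[None]):
--         token = token.strip(' ')
--         for search, replace in SUBSTITUTIONS:
--             token = token.replace(search, replace)
--         start_positions.append(len("".join(text)))
--         text.append(token)
--         stop_positions.append(len("".join(text)))
--         if next_token is not None and \
--            not starts_with_any(next_token.rstrip(), NO_SPACE_BEFORE) and \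
--            not ends_with_any(token, NO_SPACE_AFTER) and not \
--            token == '':
--             text.append(" ")
--     start_positions.append(len("".join(text)))
--     stop_positions.append(len("".join(text)))
--     return "".join(text), start_positions, stop_positions
-- ===== SOURCE B (Python) =====
-- NO_SPACE_BEFORE = [
--     ".", ",", ";", ":", "!", "?", " ", "-",
--     "'s", "'d", "'ve", "'ll", "'t", "'s", "n't",
--     "\u2019s", "\u2019d", "\u2019ve", "\u2019ll", "\u2019t", "\u2019s", "n\u2019t",
--     None, "\n"
-- ]
--
-- NO_SPACE_AFTER = [' ', '', '\n', '-', None]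
--
-- SUBSTITUTIONS = [
--     ['&nbsp;', ' '],
--     [' - ', '-'],
--     ['- ', '-'],
--     ['"', '" '],
--     ['\u201d', '"'],
--     ['\u201c', '"'],
--     ['  ', ' '],
--     ['\n ', '\n']
-- ]
--
--
-- def ends_with_any(string, items):
--     return any(string.endswith(item) for item in items
--                if item is not None and len(item) > 0)
--
--
-- def starts_with_any(string, items):
--     if string is None:
--         return False
--     return any(string.startswith(item) for item in items
--                if item is not None and len(item) > 0)
--
--
-- def _clean(token):
--     token = token.strip(' ')
--     for search, replace in SUBSTITUTIONS:
--         token = token.replace(search, replace)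
--     return token
--
--
-- def _space_after(token, next_token):
--     if next_token is None or token == '':
--         return False
--     if starts_with_any(next_token.rstrip(), NO_SPACE_BEFORE):
--         return False
--     return not ends_with_any(token, NO_SPACE_AFTER)
--
--
-- def doctokens_to_text(doctokens):
--     # pass 1: the pieces of the output text, flagged token (True) / inserted space (False)
--     pieces = []
--     n = len(doctokens)
--     for i, tok in enumerate(doctokens):
--         token = _clean(tok)
--         pieces.append((token, True))
--         nxt = doctokens[i + 1] if i + 1 < n else None
--         if _space_after(token, nxt):
--             pieces.append((' ', False))
--     # pass 2: cumulative character offsets over the pieces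
--     total = 0
--     offsets = [0]
--     for p, _ in pieces:
--         total += len(p)
--         offsets.append(total)
--     # pass 3: emit start/stop only for token pieces, then the trailing sentinel
--     starts, stops = [], []
--     for i, (_, flag) in enumerate(pieces):
--         if flag:
--             starts.append(offsets[i])
--             stops.append(offsets[i + 1])
--     last = offsets[-1]
--     starts.append(last)
--     stops.append(last)
--     return ''.join(p for p, _ in pieces), starts, stops
-- ===== Notes on version B (the rewrite author's own statement) =====
-- stated objective: faster
-- what changed: A rebuilds and measures the whole joined text with len(''.join(text)) inside the loop (quadratic); B does one pass collecting flagged pieces, a second pass of cumulative offsets, and a third emitting start/stop from the offset table.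
import Mathlib
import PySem

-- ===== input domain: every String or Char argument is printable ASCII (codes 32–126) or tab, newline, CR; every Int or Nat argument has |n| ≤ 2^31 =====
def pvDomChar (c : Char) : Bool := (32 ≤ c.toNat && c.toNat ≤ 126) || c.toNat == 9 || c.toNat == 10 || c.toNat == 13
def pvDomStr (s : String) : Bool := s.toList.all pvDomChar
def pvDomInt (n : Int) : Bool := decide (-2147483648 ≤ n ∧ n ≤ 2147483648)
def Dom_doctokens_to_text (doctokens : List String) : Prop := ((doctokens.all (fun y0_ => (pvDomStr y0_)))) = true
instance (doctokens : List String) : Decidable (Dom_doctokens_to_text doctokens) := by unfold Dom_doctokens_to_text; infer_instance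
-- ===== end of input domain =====

-- B replaces A's per-token len("".join(text)) remeasuring with a pieces list plus one cumulative-offset pass (faster).


-- module constants (shared context of both implementations)
def pySubs : List (String × String) :=
  [("&nbsp;", " "), (" - ", "-"), ("- ", "-"), ("\"", "\" "),
   ("”", "\""), ("“", "\""), ("  ", " "), ("\n ", "\n")]

def noSpaceBefore : List (Option String) :=
  [some ".", some ",", some ";", some ":", some "!", some "?", some " ", some "-",
   some "'s", some "'d", some "'ve", some "'ll", some "'t", some "'s", some "n't",
   some "’s", some "’d", some "’ve", some "’ll", some "’t", some "’s", some "n’t",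
   none, some "\n"]

def noSpaceAfter : List (Option String) := [some " ", some "", some "\n", some "-", none]

def endsWithAny (s : String) (items : List (Option String)) : Bool :=
  items.any fun it =>
    match it with
    | some i => if 0 < PySem.Str.len i then PySem.Str.endswith s i else false
    | none => false

def startsWithAny (s : String) (items : List (Option String)) : Bool :=
  items.any fun it =>
    match it with
    | some i => if 0 < PySem.Str.len i then PySem.Str.startswith s i else false
    | none => false

-- ===== PORT A =====
def aLoop : List (String × Option String) → List String → List Int → List Int →
    List String × List Int × List Int
  | [], text, starts, stops => (text, starts, stops)
  | (tok, next) :: rest, text, starts, stops =>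
    let token := pySubs.foldl (fun t sr => PySem.Str.replace t sr.1 sr.2)
                   (PySem.Str.stripChars tok " ")
    let starts2 := starts ++ [PySem.Str.len (PySem.Str.join "" text)]
    let text2 := text ++ [token]
    let stops2 := stops ++ [PySem.Str.len (PySem.Str.join "" text2)]
    let text3 :=
      match next with
      | some nt =>
        if !startsWithAny (PySem.Str.rstrip nt) noSpaceBefore
            && !endsWithAny token noSpaceAfter && !(token == "") then text2 ++ [" "] else text2
      | none => text2
    aLoop rest text3 starts2 stops2

def doctokens_to_text (doctokens : List String) : String × List Int × List Int :=
  let pairs := doctokens.zip ((PySem.List.slice doctokens (some 1) none).map some ++ [none])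
  match aLoop pairs [] [] [] with
  | (text, starts, stops) =>
    let tot := PySem.Str.len (PySem.Str.join "" text)
    (PySem.Str.join "" text, starts ++ [tot], stops ++ [tot])

-- ===== PORT B =====
def cleanTok (t : String) : String :=
  pySubs.foldl (fun t sr => PySem.Str.replace t sr.1 sr.2) (PySem.Str.stripChars t " ")

def spaceAfter (token : String) (next : Option String) : Bool :=
  match next with
  | none => false
  | some nt =>
    if token == "" then false
    else if startsWithAny (PySem.Str.rstrip nt) noSpaceBefore then false
    else !(endsWithAny token noSpaceAfter)

-- pass 1: pieces of the output, flagged token (true) / inserted space (false)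
def bPieces : List String → List (String × Bool)
  | [] => []
  | t :: rest =>
    let token := cleanTok t
    (token, true) ::
      (if spaceAfter token rest.head? then (" ", false) :: bPieces rest else bPieces rest)

-- pass 2: cumulative character offsets over the pieces
def bOffsets : List (String × Bool) → List Int → Int → List Int
  | [], offs, _ => offs
  | p :: rest, offs, total =>
    bOffsets rest (offs ++ [total + PySem.Str.len p.1]) (total + PySem.Str.len p.1)

-- pass 3: emit start/stop from the offset table for token-flagged pieces
def bEmit : List Bool → List Int → List Int × List Int
  | [], _ => ([], [])
  | _ :: _, [] => ([], [])
  | f :: fs, o :: os =>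
    let rest := bEmit fs os
    if f then (o :: rest.1, os.headD 0 :: rest.2) else rest

def doctokens_to_text_alt (doctokens : List String) : String × List Int × List Int :=
  let pieces := bPieces doctokens
  let offsets := bOffsets pieces [0] 0
  match bEmit (pieces.map (·.2)) offsets with
  | (starts, stops) =>
    let last := offsets.getLastD 0
    (PySem.Str.join "" (pieces.map (·.1)), starts ++ [last], stops ++ [last])

-- ===== PRECONDITION & SPEC =====
def Spec_doctokens_to_text (doctokens : List String) (out : String × List Int × List Int) : Prop := out = doctokens_to_text_alt doctokens
instance (doctokens : List String) (out : String × List Int × List Int) : Decidable (Spec_doctokens_to_text doctokens out) := by unfold Spec_doctokens_to_text; infer_instance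

-- ===== CLAIM (what is proved, stated in full; the proofs are below) =====
def Claim_equal_doctokens_to_text : Prop := ∀ (doctokens : List String), Dom_doctokens_to_text doctokens → Spec_doctokens_to_text doctokens (doctokens_to_text doctokens)

-- ===== LEMMAS AND PROOFS =====

def lenJoin (l : List String) : Int := PySem.Str.len (PySem.Str.join "" l)

def lenSum (ps : List (String × Bool)) : Int := (ps.map fun p => PySem.Str.len p.1).sum

def startsFrom : Int → List (String × Bool) → List Int
  | _, [] => []
  | base, (s, f) :: ps =>
    if f then base :: startsFrom (base + PySem.Str.len s) ps
    else startsFrom (base + PySem.Str.len s) ps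

def stopsFrom : Int → List (String × Bool) → List Int
  | _, [] => []
  | base, (s, f) :: ps =>
    if f then (base + PySem.Str.len s) :: stopsFrom (base + PySem.Str.len s) ps
    else stopsFrom (base + PySem.Str.len s) ps

def offTable : Int → List (String × Bool) → List Int
  | _, [] => []
  | t, p :: ps => (t + PySem.Str.len p.1) :: offTable (t + PySem.Str.len p.1) ps

def mkPairs (ts : List String) : List (String × Option String) :=
  ts.zip ((PySem.List.slice ts (some 1) none).map some ++ [none])

theorem chars_join_nil_sep (pss : List (List Char)) :
    PySem.Chars.join [] pss = pss.flatten := by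
  induction pss with
  | nil => simp [PySem.Chars.join_nil]
  | cons p ps ih =>
    cases ps with
    | nil => simp [PySem.Chars.join_singleton]
    | cons q qs =>
      rw [PySem.Chars.join_cons_cons]
      simp [ih]

theorem lenJoin_eq (l : List String) :
    lenJoin l = ((l.map String.toList).flatten.length : Int) := by
  simp [lenJoin, PySem.Str.len_eq, PySem.Str.toList_join, chars_join_nil_sep]

theorem lenJoin_nil : lenJoin [] = 0 := by simp [lenJoin_eq]

theorem lenJoin_cons (s : String) (l : List String) :
    lenJoin (s :: l) = PySem.Str.len s + lenJoin l := by
  simp [lenJoin_eq, PySem.Str.len_eq]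

theorem lenJoin_append (a b : List String) :
    lenJoin (a ++ b) = lenJoin a + lenJoin b := by
  simp [lenJoin_eq]

theorem lenJoin_singleton (s : String) : lenJoin [s] = PySem.Str.len s := by
  simp [lenJoin_cons, lenJoin_nil]

theorem len_space : PySem.Str.len " " = 1 := by decide

theorem lenJoin_map_fst (ps : List (String × Bool)) :
    lenJoin (ps.map (·.1)) = lenSum ps := by
  induction ps with
  | nil => simp [lenJoin_nil, lenSum]
  | cons p ps ih => simp only [List.map_cons, lenJoin_cons, ih, lenSum, List.sum_cons]

theorem mkPairs_cons (t : String) (rest : List String) :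
    mkPairs (t :: rest) = (t, rest.head?) :: mkPairs rest := by
  unfold mkPairs
  rw [PySem.List.slice_from_one, PySem.List.slice_from_one]
  cases rest with
  | nil => simp
  | cons r rs => simp

theorem cond_some_eq (token : String) (nt : String) :
    (!startsWithAny (PySem.Str.rstrip nt) noSpaceBefore
        && !endsWithAny token noSpaceAfter && !(token == ""))
      = spaceAfter token (some nt) := by
  simp only [spaceAfter]
  cases h1 : token == "" <;>
    cases h2 : startsWithAny (PySem.Str.rstrip nt) noSpaceBefore <;>
      cases h3 : endsWithAny token noSpaceAfter <;> simp

theorem aLoop_eq (ts : List String) :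
    ∀ (text : List String) (starts stops : List Int),
      aLoop (mkPairs ts) text starts stops =
        (text ++ (bPieces ts).map (·.1),
         starts ++ startsFrom (lenJoin text) (bPieces ts),
         stops ++ stopsFrom (lenJoin text) (bPieces ts)) := by
  induction ts with
  | nil =>
    intro text starts stops
    simp [mkPairs, aLoop, bPieces, startsFrom, stopsFrom]
  | cons t rest ih =>
    intro text starts stops
    rw [mkPairs_cons]
    have hclean : List.foldl (fun t sr => PySem.Str.replace t sr.1 sr.2)
        (PySem.Str.stripChars t " ") pySubs = cleanTok t := rfl
    have hL : ∀ (l : List String), PySem.Str.len (PySem.Str.join "" l) = lenJoin l :=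
      fun _ => rfl
    simp only [aLoop, hclean, bPieces]
    cases hnext : rest.head? with
    | none =>
      have hs : spaceAfter (cleanTok t) none = false := rfl
      rw [hs, if_neg (by simp), ih]
      simp only [hL, startsFrom, stopsFrom, List.map_cons, List.cons_append,
        List.append_assoc, List.nil_append, lenJoin_append, lenJoin_singleton, if_true]
    | some nt =>
      dsimp only
      rw [cond_some_eq (cleanTok t) nt]
      cases hc : spaceAfter (cleanTok t) (some nt) with
      | false =>
        rw [if_neg (by simp), ih]
        simp only [hL, startsFrom, stopsFrom, List.map_cons, List.cons_append,
          List.append_assoc, List.nil_append, lenJoin_append, lenJoin_singleton,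
          if_true, Bool.false_eq_true, if_false]
      | true =>
        rw [if_pos rfl, ih]
        simp only [hL, startsFrom, stopsFrom, List.map_cons, List.cons_append,
          List.append_assoc, List.nil_append, lenJoin_append,
          lenJoin_cons, lenJoin_nil, len_space, if_true, Bool.false_eq_true, if_false]
        ring_nf

theorem bOffsets_eq (ps : List (String × Bool)) :
    ∀ (offs : List Int) (t : Int), bOffsets ps offs t = offs ++ offTable t ps := by
  induction ps with
  | nil => intro offs t ; simp [bOffsets, offTable]
  | cons p ps ih => intro offs t ; simp [bOffsets, offTable, ih]

theorem bEmit_eq (ps : List (String × Bool)) :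
    ∀ (t : Int), bEmit (ps.map (·.2)) (t :: offTable t ps) =
      (startsFrom t ps, stopsFrom t ps) := by
  induction ps with
  | nil => intro t ; simp [bEmit, startsFrom, stopsFrom]
  | cons p ps ih =>
    intro t
    obtain ⟨s, f⟩ := p
    simp only [List.map_cons, offTable, bEmit, ih (t + PySem.Str.len s)]
    cases f <;> simp [startsFrom, stopsFrom]

theorem offTable_last (ps : List (String × Bool)) :
    ∀ (t : Int), (offTable t ps).getLastD t = t + lenSum ps := by
  induction ps with
  | nil => intro t ; simp [offTable, lenSum]
  | cons p ps ih =>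
    intro t
    simp only [offTable, List.getLastD_cons, ih, lenSum, List.map_cons, List.sum_cons]
    ring

-- ===== VERDICT (by name: the statement is the Claim_ definition above) =====
theorem doctokens_to_text_spec : Claim_equal_doctokens_to_text := by
  intro doctokens _
  unfold Spec_doctokens_to_text
  have hp : doctokens.zip ((PySem.List.slice doctokens (some 1) none).map some ++ [none])
      = mkPairs doctokens := rfl
  simp only [doctokens_to_text, doctokens_to_text_alt, hp, aLoop_eq, bOffsets_eq,
    List.nil_append]
  have h0 : ([0] : List Int) ++ offTable 0 (bPieces doctokens)
      = 0 :: offTable 0 (bPieces doctokens) := by simp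
  rw [h0, bEmit_eq]
  have hlast : (0 :: offTable 0 (bPieces doctokens)).getLastD 0
      = lenSum (bPieces doctokens) := by
    rw [List.getLastD_cons, offTable_last] ; ring
  have hlen : PySem.Str.len (PySem.Str.join "" ((bPieces doctokens).map (·.1)))
      = lenSum (bPieces doctokens) := lenJoin_map_fst (bPieces doctokens)
  rw [lenJoin_nil, hlen, hlast]
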